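-- pv_equiv track=rewrite | github.com/spollard1810/simpleDeviceQuery | classes/command_parser.py | parse_inventory
-- ===== SOURCE A (Python) =====
-- from typing import Dict, List, Callable
--
-- def parse_inventory(output: str) -> List[Dict[str, str]]:
--     """Parse 'show inventory' output"""
--     inventory = []
--     current_item = {}
--
--     for line in output.splitlines():
--         if "NAME:" in line:
--             if current_item:
--                 inventory.append(current_item)
--             current_item = {}
--             parts = line.split('"')
--             if len(parts) >= 2:
--                 current_item['name'] = parts[1]
--         elif "DESCR:" in line:
--             parts = line.split('"')
--             if len(parts) >= 2:
--                 current_item['description'] = parts[1]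
--         elif "SN:" in line:
--             current_item['serial'] = line.split("SN:")[1].strip()
--
--     if current_item:
--         inventory.append(current_item)
--     return inventory
-- ===== SOURCE B (Python) =====
-- def _parse_group(lines):
--     item = {}
--     for line in lines:
--         if "NAME:" in line:
--             q = line.split('"')
--             if len(q) >= 2:
--                 item['name'] = q[1]
--         elif "DESCR:" in line:
--             q = line.split('"')
--             if len(q) >= 2:
--                 item['description'] = q[1]
--         elif "SN:" in line:
--             item['serial'] = line.split("SN:")[1].strip()
--     return item
--
--
-- def parse_inventory(output):
--     """Parse 'show inventory' output: partition lines into records, then parse each."""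
--     groups = []
--     cur = []
--     for line in output.splitlines():
--         if "NAME:" in line:
--             groups.append(cur)
--             cur = [line]
--         else:
--             cur.append(line)
--     groups.append(cur)
--     return [d for d in (_parse_group(g) for g in groups) if d]
-- ===== Notes on version B (the rewrite author's own statement) =====
-- stated objective: alternative
-- what changed: Replaces the carry-a-mutable-dict flush-on-NAME-boundary loop by a two-stage pipeline: partition the lines into record groups at NAME: boundaries, then parse each group independently and keep the non-empty dicts.
import Mathlib
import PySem

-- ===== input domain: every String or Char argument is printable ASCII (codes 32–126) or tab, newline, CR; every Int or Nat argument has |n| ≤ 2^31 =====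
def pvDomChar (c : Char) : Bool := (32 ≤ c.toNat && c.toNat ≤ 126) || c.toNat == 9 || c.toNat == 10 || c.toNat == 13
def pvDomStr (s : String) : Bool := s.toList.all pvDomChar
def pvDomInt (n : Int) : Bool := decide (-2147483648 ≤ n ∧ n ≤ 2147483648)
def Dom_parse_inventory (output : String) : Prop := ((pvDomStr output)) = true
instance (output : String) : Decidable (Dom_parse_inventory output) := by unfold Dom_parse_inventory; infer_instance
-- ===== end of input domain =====

-- B replaces A's carry-a-mutable-dict flush-on-boundary loop by a partition-into-groups-then-parse-each pipeline (alternative decomposition, same cost).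


-- s.split(sep) for nonempty sep ('"' and "SN:" here), exact: split? is none only for sep = ""
def pvSplit (s sep : String) : List String := (PySem.Str.split? s sep).getD []

-- ===== PORT A =====
-- loop body of A's for-loop: state = (inventory, current_item)
def pvStepA (st : List (PySem.Dict String String) × PySem.Dict String String) (line : String) :
    List (PySem.Dict String String) × PySem.Dict String String :=
  if PySem.Str.isIn "NAME:" line then
    let inventory := if st.2.items = [] then st.1 else st.1 ++ [st.2]
    let parts := pvSplit line "\""
    if 2 ≤ parts.length then
      (inventory, (PySem.Dict.empty : PySem.Dict String String).insert "name" (parts.getD 1 ""))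
    else (inventory, PySem.Dict.empty)
  else if PySem.Str.isIn "DESCR:" line then
    let parts := pvSplit line "\""
    if 2 ≤ parts.length then (st.1, st.2.insert "description" (parts.getD 1 ""))
    else (st.1, st.2)
  else if PySem.Str.isIn "SN:" line then
    (st.1, st.2.insert "serial" (PySem.Str.strip ((pvSplit line "SN:").getD 1 "")))
  else (st.1, st.2)

-- the final 'if current_item: inventory.append(current_item)' and 'return inventory'
def pvAfinal (st : List (PySem.Dict String String) × PySem.Dict String String) :
    List (PySem.Dict String String) :=
  if st.2.items = [] then st.1 else st.1 ++ [st.2]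

def parse_inventory (output : String) : List (List (String × String)) :=
  (pvAfinal ((PySem.Str.splitlines output).foldl pvStepA ([], PySem.Dict.empty))).map
    PySem.Dict.items

-- ===== PORT B =====
-- _parse_group's loop body
def pvApplyLine (item : PySem.Dict String String) (line : String) : PySem.Dict String String :=
  if PySem.Str.isIn "NAME:" line then
    let q := pvSplit line "\""
    if 2 ≤ q.length then item.insert "name" (q.getD 1 "") else item
  else if PySem.Str.isIn "DESCR:" line then
    let q := pvSplit line "\""
    if 2 ≤ q.length then item.insert "description" (q.getD 1 "") else item
  else if PySem.Str.isIn "SN:" line then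
    item.insert "serial" (PySem.Str.strip ((pvSplit line "SN:").getD 1 ""))
  else item

def pvParseGroup (lines : List String) : PySem.Dict String String :=
  lines.foldl pvApplyLine PySem.Dict.empty

-- partition loop body: state = (groups, cur)
def pvStepB (st : List (List String) × List String) (line : String) :
    List (List String) × List String :=
  if PySem.Str.isIn "NAME:" line then (st.1 ++ [st.2], [line]) else (st.1, st.2 ++ [line])

-- the final 'groups.append(cur)'
def pvBfinal (st : List (List String) × List String) : List (List String) := st.1 ++ [st.2]

def parse_inventory_alt (output : String) : List (List (String × String)) :=
  ((((pvBfinal ((PySem.Str.splitlines output).foldl pvStepB ([], []))).map pvParseGroup).filter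
      (fun d => ¬ d.items = [])).map PySem.Dict.items)

-- ===== PRECONDITION & SPEC =====
def Spec_parse_inventory (output : String) (out : List (List (String × String))) : Prop := out = parse_inventory_alt output
instance (output : String) (out : List (List (String × String))) : Decidable (Spec_parse_inventory output out) := by unfold Spec_parse_inventory; infer_instance

-- ===== CLAIM (what is proved, stated in full; the proofs are below) =====
def Claim_equal_parse_inventory : Prop := ∀ (output : String), Dom_parse_inventory output → Spec_parse_inventory output (parse_inventory output)

-- ===== LEMMAS AND PROOFS =====

-- flush of a current dict: the items A appends at a boundary / at the end
def pvFlush (d : PySem.Dict String String) : List (PySem.Dict String String) :=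
  if d.items = [] then [] else [d]

lemma pvAfinal_eq (st : List (PySem.Dict String String) × PySem.Dict String String) :
    pvAfinal st = st.1 ++ pvFlush st.2 := by
  simp only [pvAfinal, pvFlush]; split_ifs <;> simp

lemma pvStepA_split (st : List (PySem.Dict String String) × PySem.Dict String String)
    (line : String) :
    ((pvStepA st line).1 = st.1 ++ (pvStepA (([], st.2)) line).1) ∧
    ((pvStepA st line).2 = (pvStepA (([], st.2)) line).2) := by
  simp only [pvStepA]
  split_ifs <;> simp

lemma pvAfold_split (ls : List String) :
    ∀ (inv : List (PySem.Dict String String)) (cur : PySem.Dict String String),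
    pvAfinal (ls.foldl pvStepA (inv, cur)) = inv ++ pvAfinal (ls.foldl pvStepA ([], cur)) := by
  induction ls with
  | nil => intro inv cur; simp [pvAfinal_eq]
  | cons l ls ih =>
    intro inv cur
    have h := pvStepA_split (inv, cur) l
    simp only [List.foldl_cons]
    rw [show (pvStepA (inv, cur) l) = ((pvStepA (inv, cur) l).1, (pvStepA (inv, cur) l).2) from rfl,
        show (pvStepA ([], cur) l) = ((pvStepA ([], cur) l).1, (pvStepA ([], cur) l).2) from rfl]
    rw [h.1, h.2, ih, ih ((pvStepA ([], cur) l).1)]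
    simp [List.append_assoc]

-- the NAME-boundary step of A, in terms of pvApplyLine
lemma pvStepA_name (cur : PySem.Dict String String) (l : String)
    (h : PySem.Str.isIn "NAME:" l = true) :
    pvStepA ([], cur) l = (pvFlush cur, pvApplyLine PySem.Dict.empty l) := by
  simp only [pvStepA, pvApplyLine, pvFlush, h]
  split_ifs <;> simp_all

-- the non-boundary step of A, in terms of pvApplyLine
lemma pvStepA_other (cur : PySem.Dict String String) (l : String)
    (h : PySem.Str.isIn "NAME:" l = false) :
    pvStepA ([], cur) l = ([], pvApplyLine cur l) := by
  simp only [pvStepA, pvApplyLine, h]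
  split_ifs <;> simp_all

-- B's per-group dict stream, as a recursion over the remaining lines
def pvBdicts (d : PySem.Dict String String) : List String → List (PySem.Dict String String)
  | [] => pvFlush d
  | l :: ls =>
    if PySem.Str.isIn "NAME:" l then pvFlush d ++ pvBdicts (pvApplyLine PySem.Dict.empty l) ls
    else pvBdicts (pvApplyLine d l) ls

lemma pvA_eq_Bdicts (ls : List String) :
    ∀ cur, pvAfinal (ls.foldl pvStepA ([], cur)) = pvBdicts cur ls := by
  induction ls with
  | nil => intro cur; simp [pvAfinal_eq, pvBdicts]
  | cons l ls ih =>
    intro cur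
    cases h : PySem.Str.isIn "NAME:" l with
    | true =>
      simp only [List.foldl_cons, pvStepA_name cur l h, pvBdicts, h, if_true]
      rw [pvAfold_split, ih]
    | false =>
      simp only [List.foldl_cons, pvStepA_other cur l h, pvBdicts, h, Bool.false_eq_true,
        if_false]
      exact ih _

lemma pvBfold_split (ls : List String) :
    ∀ (gs : List (List String)) (cur : List String),
    pvBfinal (ls.foldl pvStepB (gs, cur)) = gs ++ pvBfinal (ls.foldl pvStepB ([], cur)) := by
  induction ls with
  | nil => intro gs cur; simp [pvBfinal]
  | cons l ls ih =>
    intro gs cur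
    simp only [List.foldl_cons, pvStepB]
    split_ifs
    · rw [ih (gs ++ [cur]) [l], ih ([] ++ [cur]) [l]]; simp
    · exact ih gs (cur ++ [l])

lemma pvParseGroup_append (g : List String) (l : String) :
    pvParseGroup (g ++ [l]) = pvApplyLine (pvParseGroup g) l := by
  simp [pvParseGroup]

lemma pvB_groups_eq_Bdicts (ls : List String) :
    ∀ cur, ((pvBfinal (ls.foldl pvStepB ([], cur))).map pvParseGroup).filter
        (fun d => ¬ d.items = []) = pvBdicts (pvParseGroup cur) ls := by
  induction ls with
  | nil =>
    intro cur
    simp only [List.foldl_nil, pvBfinal, List.nil_append, List.map_cons, List.map_nil,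
      List.filter, pvBdicts, pvFlush]
    split_ifs <;> simp_all
  | cons l ls ih =>
    intro cur
    cases h : PySem.Str.isIn "NAME:" l with
    | true =>
      simp only [List.foldl_cons, pvStepB, h, if_true, pvBdicts]
      rw [pvBfold_split]
      simp only [List.nil_append, List.map_append, List.filter_append, List.map_cons,
        List.map_nil]
      rw [ih [l]]
      rw [show pvParseGroup [l] = pvApplyLine PySem.Dict.empty l from rfl]
      congr 1
      simp only [List.filter, pvFlush]
      split_ifs <;> simp_all
    | false =>
      simp only [List.foldl_cons, pvStepB, h, Bool.false_eq_true, if_false, pvBdicts]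
      rw [ih (cur ++ [l]), pvParseGroup_append]

-- ===== VERDICT (by name: the statement is the Claim_ definition above) =====
theorem parse_inventory_spec : Claim_equal_parse_inventory := by
  intro output _
  unfold Spec_parse_inventory parse_inventory parse_inventory_alt
  rw [pvA_eq_Bdicts,
    show (PySem.Dict.empty : PySem.Dict String String) = pvParseGroup [] from rfl,
    ← pvB_groups_eq_Bdicts (cur := [])]
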